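-- pv_equiv track=rewrite | github.com/t-yamana/atcoder_abc | B/214-HowMany.py | zentan
-- ===== SOURCE A (Python) =====
-- def zentan(s, t) -> int:
--     pat = 0
--     for i in range(s+1):
--         for j in range(s-i+1):
--             for k in range(s-i-j+1):
--                 if i * j * k <= t:
--                     pat += 1
--     return pat
-- ===== SOURCE B (Python) =====
-- def zentan(s, t) -> int:
--     pat = 0
--     for i in range(s+1):
--         for j in range(s-i+1):
--             kmax = s - i - j
--             if i * j == 0:
--                 pat += kmax + 1 if t >= 0 else 0
--             else:
--                 c = min(kmax, t // (i * j)) + 1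
--                 if c > 0:
--                     pat += c
--     return pat
-- ===== Notes on version B (the rewrite author's own statement) =====
-- stated objective: faster
-- what changed: The innermost k-loop is replaced by a closed-form count min(kmax, t//(i*j))+1 (clamped at 0, with the i*j==0 case handled by sign of t), reducing O(s^3) to O(s^2).
import Mathlib
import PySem

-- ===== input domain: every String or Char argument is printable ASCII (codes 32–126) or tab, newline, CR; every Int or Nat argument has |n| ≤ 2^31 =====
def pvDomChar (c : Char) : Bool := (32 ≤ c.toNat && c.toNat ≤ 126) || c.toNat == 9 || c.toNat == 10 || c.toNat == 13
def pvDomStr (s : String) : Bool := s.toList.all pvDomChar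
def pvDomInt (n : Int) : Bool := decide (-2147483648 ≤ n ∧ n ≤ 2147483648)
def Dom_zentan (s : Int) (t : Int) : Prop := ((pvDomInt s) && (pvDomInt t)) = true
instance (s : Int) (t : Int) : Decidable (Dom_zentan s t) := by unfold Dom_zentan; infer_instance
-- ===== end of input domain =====

-- B replaces the innermost k-loop of A by a closed-form count, O(s^3) → O(s^2).

-- ===== PORT A =====
def zentan (s : Int) (t : Int) : Int :=
  (PySem.List.pyRange 0 (s+1) 1).foldl (fun pat i =>
    (PySem.List.pyRange 0 (s-i+1) 1).foldl (fun pat j =>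
      (PySem.List.pyRange 0 (s-i-j+1) 1).foldl (fun pat k =>
        if i * j * k ≤ t then pat + 1 else pat) pat) pat) 0

-- ===== PORT B =====
def zentan_alt (s : Int) (t : Int) : Int :=
  (PySem.List.pyRange 0 (s+1) 1).foldl (fun pat i =>
    (PySem.List.pyRange 0 (s-i+1) 1).foldl (fun pat j =>
      let kmax := s - i - j
      if i * j = 0 then
        pat + (if 0 ≤ t then kmax + 1 else 0)
      else
        let c := min kmax (PySem.Int.floordiv t (i * j)) + 1
        if 0 < c then pat + c else pat) pat) 0

-- ===== PRECONDITION & SPEC =====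
def Spec_zentan (s : Int) (t : Int) (out : Int) : Prop := out = zentan_alt s t
instance (s : Int) (t : Int) (out : Int) : Decidable (Spec_zentan s t out) := by unfold Spec_zentan; infer_instance

-- ===== CLAIM (what is proved, stated in full; the proofs are below) =====
def Claim_equal_zentan : Prop := ∀ (s : Int) (t : Int), Dom_zentan s t → Spec_zentan s t (zentan s t)

-- ===== LEMMAS AND PROOFS =====

-- closed-form count of k ∈ [0, n) with p·k ≤ t, for 0 ≤ p
def pvCnt (p t : Int) (n : Nat) : Int :=
  if p = 0 then (if 0 ≤ t then (n : Int) else 0)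
  else min (n : Int) (max 0 (PySem.Int.floordiv t p + 1))

lemma pvCnt_succ (p t : Int) (hp : 0 ≤ p) (n : Nat) :
    pvCnt p t (n+1) = pvCnt p t n + (if p * (n : Int) ≤ t then 1 else 0) := by
  unfold pvCnt
  by_cases h0 : p = 0
  · subst h0; simp only [zero_mul]
    by_cases ht : 0 ≤ t <;> simp [ht]
  · have hp' : 0 < p := lt_of_le_of_ne hp (Ne.symm h0)
    have hiff : (n : Int) ≤ PySem.Int.floordiv t p ↔ p * (n : Int) ≤ t := by
      rw [PySem.Int.le_floordiv_iff_mul_le hp', mul_comm]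
    simp only [if_neg h0]
    by_cases hc : p * (n : Int) ≤ t
    · have : (n : Int) ≤ PySem.Int.floordiv t p := hiff.mpr hc
      simp only [if_pos hc]; push_cast; omega
    · have : ¬ (n : Int) ≤ PySem.Int.floordiv t p := fun h => hc (hiff.mp h)
      simp only [if_neg hc]; push_cast; omega

lemma inner_loop (p t : Int) (hp : 0 ≤ p) (n : Nat) (pat : Int) :
    ((List.range n).map (fun k : Nat => (k : Int))).foldl
      (fun pat k => if p * k ≤ t then pat + 1 else pat) pat
    = pat + pvCnt p t n := by
  induction n generalizing pat with
  | zero => simp [pvCnt]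
  | succ n ih =>
    rw [List.range_succ, List.map_append, List.foldl_append, ih, pvCnt_succ p t hp]
    simp only [List.map_cons, List.map_nil, List.foldl_cons, List.foldl_nil]
    by_cases hc : p * (n : Int) ≤ t <;> simp [hc]
    ring

-- A's k-loop (over pyRange 0 (kmax+1) 1) equals B's branch expression, for kmax ≥ 0, 0 ≤ p = i·j
lemma kloop_closed (p t kmax : Int) (hp : 0 ≤ p) (hk : 0 ≤ kmax) (pat : Int) :
    (PySem.List.pyRange 0 (kmax+1) 1).foldl
      (fun pat k => if p * k ≤ t then pat + 1 else pat) pat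
    = (if p = 0 then pat + (if 0 ≤ t then kmax + 1 else 0)
       else if 0 < min kmax (PySem.Int.floordiv t p) + 1
            then pat + (min kmax (PySem.Int.floordiv t p) + 1) else pat) := by
  have hrange : PySem.List.pyRange 0 (kmax+1) 1
      = (List.range (kmax+1).toNat).map (fun k : Nat => (k : Int)) := by
    rw [PySem.List.pyRange_one]; simp
  rw [hrange, inner_loop p t hp]
  have hcast : ((kmax+1).toNat : Int) = kmax + 1 := by omega
  unfold pvCnt
  by_cases h0 : p = 0
  · simp only [if_pos h0, hcast]
  · simp only [if_neg h0, hcast]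
    set q := PySem.Int.floordiv t p with hq
    by_cases hc : 0 < min kmax q + 1 <;> simp only [hc, if_true, if_false]
    · have : min (kmax+1) (max 0 (q+1)) = min kmax q + 1 := by omega
      rw [this]
    · have : min (kmax+1) (max 0 (q+1)) = 0 := by omega
      rw [this, add_zero]

lemma body_eq (s t i : Int) (hi : i ∈ PySem.List.pyRange 0 (s+1) 1) (pat : Int) (j : Int)
    (hj : j ∈ PySem.List.pyRange 0 (s-i+1) 1) :
    (PySem.List.pyRange 0 (s-i-j+1) 1).foldl
      (fun pat k => if i * j * k ≤ t then pat + 1 else pat) pat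
    = (let kmax := s - i - j
       if i * j = 0 then pat + (if 0 ≤ t then kmax + 1 else 0)
       else
         let c := min kmax (PySem.Int.floordiv t (i * j)) + 1
         if 0 < c then pat + c else pat) := by
  rw [PySem.List.mem_pyRange_one] at hi hj
  have hp : 0 ≤ i * j := mul_nonneg hi.1 hj.1
  have hk : 0 ≤ s - i - j := by omega
  simpa using kloop_closed (i*j) t (s-i-j) hp hk pat

-- ===== VERDICT (by name: the statement is the Claim_ definition above) =====
theorem zentan_spec : Claim_equal_zentan := by
  intro s t _
  unfold Spec_zentan zentan zentan_alt
  refine PySem.List.foldl_congr_mem _ _ _ _ (fun pat i hi => ?_)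
  exact PySem.List.foldl_congr_mem _ _ _ _ (fun pat' j hj => body_eq s t i hi pat' j hj)
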